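-- pv_equiv track=rewrite | github.com/andreacaleo/GrMachineLearning | challenge.py | possible_positions
-- ===== SOURCE A (Python) =====
-- def possible_positions(board):
--     possible = []
--
--     for r in range(3):
--         if board[r][0] != " " and board[r][0] == board[r][1] and board[r][0] == board[r][2]:
--             return []
--
--     for c in range(3):
--         if board[0][c] != " " and board[0][c] == board[1][c] and board[0][c] == board[2][c]:
--             return []
--
--     if board[0][0] != " " and board[0][0] == board[1][1] and board[0][0] == board[2][2]:
--         return []
--
--     if board[0][2] != " " and board[0][2] == board[1][1] and board[0][2] == board[2][0]:
--         return []
--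
--     for row in range(3):
--         for column in range(3):
--             if board[row][column] == " ":
--                 possible.append(row * 3 + column)
--
--     return possible
-- ===== SOURCE B (Python) =====
-- MAGIC = [8, 1, 6, 3, 5, 7, 4, 9, 2]
--
--
-- def possible_positions(board):
--     # Magic-square win test: cells carry the 3x3 magic-square values, so three
--     # equal non-blank cells form a winning line iff their values sum to 15.
--     flat = [board[i // 3][i % 3] for i in range(9)]
--     for i in range(9):
--         if flat[i] == " ":
--             continue
--         for j in range(i + 1, 9):
--             for k in range(j + 1, 9):
--                 if flat[i] == flat[j] == flat[k] and MAGIC[i] + MAGIC[j] + MAGIC[k] == 15: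
--                     return []
--     return [i for i in range(9) if flat[i] == " "]
-- ===== Notes on version B (the rewrite author's own statement) =====
-- stated objective: alternative
-- what changed: Replaced A's five separate row/column/diagonal win checks by the magic-square criterion on the flattened board (three equal non-blank cells win iff their 3x3 magic-square values sum to 15, tested over all index triples i<j<k) and the nested row/column collection loop by one flat pass over indices 0..8.
-- outside the precondition, e.g. on possible_positions([['x', 'x', 'x']]): A returns [], B raises IndexError
import Mathlib
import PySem

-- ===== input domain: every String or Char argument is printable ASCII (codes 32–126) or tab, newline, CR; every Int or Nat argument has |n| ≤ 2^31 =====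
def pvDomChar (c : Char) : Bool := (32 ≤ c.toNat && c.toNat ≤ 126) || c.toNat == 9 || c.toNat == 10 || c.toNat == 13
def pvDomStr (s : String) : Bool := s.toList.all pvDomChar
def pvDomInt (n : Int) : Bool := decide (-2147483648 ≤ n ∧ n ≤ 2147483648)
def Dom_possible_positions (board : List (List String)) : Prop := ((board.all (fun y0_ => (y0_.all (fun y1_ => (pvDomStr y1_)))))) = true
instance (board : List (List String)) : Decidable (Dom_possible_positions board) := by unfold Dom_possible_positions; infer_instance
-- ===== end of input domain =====

-- B replaces A's explicit row/column/diagonal win checks by the magic-square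
-- test on the flattened board (three equal non-blank cells are a winning line
-- iff their magic-square values sum to 15) and collects empty cells in a single
-- flat pass (objective: alternative; same cost).

-- ===== PORT A =====
-- board[r][c]; inside Pre_ the indices are always in range, so getD is exact there
def pvCellA (board : List (List String)) (r c : Nat) : String :=
  (board.getD r []).getD c ""

def possible_positions (board : List (List String)) : List Int :=
  -- for r in range(3): if row r wins: return []
  if (List.range 3).any (fun r =>
      pvCellA board r 0 != " " && pvCellA board r 0 == pvCellA board r 1
        && pvCellA board r 0 == pvCellA board r 2) then []
  -- for c in range(3): if column c wins: return []
  else if (List.range 3).any (fun c =>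
      pvCellA board 0 c != " " && pvCellA board 0 c == pvCellA board 1 c
        && pvCellA board 0 c == pvCellA board 2 c) then []
  -- main diagonal
  else if pvCellA board 0 0 != " " && pvCellA board 0 0 == pvCellA board 1 1
        && pvCellA board 0 0 == pvCellA board 2 2 then []
  -- anti-diagonal
  else if pvCellA board 0 2 != " " && pvCellA board 0 2 == pvCellA board 1 1
        && pvCellA board 0 2 == pvCellA board 2 0 then []
  else
    -- possible = []; nested loops appending row*3+column for empty cells
    (List.range 3).foldl (fun acc row =>
      (List.range 3).foldl (fun acc column =>
        if pvCellA board row column == " " then acc ++ [(row : Int) * 3 + (column : Int)]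
        else acc) acc) []

-- ===== PORT B =====
-- MAGIC = [8, 1, 6, 3, 5, 7, 4, 9, 2]
def pvMagic : List Int := [8, 1, 6, 3, 5, 7, 4, 9, 2]

-- flat = [board[i // 3][i % 3] for i in range(9)]; in-range inside Pre_, so getD is exact
def pvFlat (board : List (List String)) : List String :=
  (List.range 9).map (fun i => (board.getD (i / 3) []).getD (i % 3) "")

def possible_positions_alt (board : List (List String)) : List Int :=
  let flat := pvFlat board
  -- triple loop over i < j < k: win iff equal non-blank cells whose magic values sum to 15
  if (List.range 9).any (fun i =>
      flat.getD i "" != " " &&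
      (List.range' (i + 1) (8 - i)).any (fun j =>
        (List.range' (j + 1) (8 - j)).any (fun k =>
          flat.getD i "" == flat.getD j "" && flat.getD j "" == flat.getD k "" &&
            pvMagic.getD i 0 + pvMagic.getD j 0 + pvMagic.getD k 0 == 15)))
  then []
  else (List.range 9).filterMap (fun i =>
    if flat.getD i "" == " " then some ((i : Nat) : Int) else none)

-- ===== PRECONDITION & SPEC =====
-- Pre_ excludes boards smaller than 3×3: there A raises IndexError on most of
-- them, and B (which flattens the board first) raises on all of them, including
-- the few short boards with an early winning row on which A still returns []
-- (see the cite in claim.json).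
def Pre_possible_positions (board : List (List String)) : Prop :=
  3 ≤ board.length ∧ ∀ row ∈ board.take 3, 3 ≤ row.length
instance (board : List (List String)) : Decidable (Pre_possible_positions board) := by
  unfold Pre_possible_positions; infer_instance

def pvWitness_possible_positions : List (List String) :=
  [["x", " ", "o"], [" ", "x", " "], ["o", " ", " "]]

def Spec_possible_positions (board : List (List String)) (out : List Int) : Prop := out = possible_positions_alt board
instance (board : List (List String)) (out : List Int) : Decidable (Spec_possible_positions board out) := by unfold Spec_possible_positions; infer_instance

-- ===== CLAIM (what is proved, stated in full; the proofs are below) =====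
def Claim_equal_possible_positions : Prop := ∀ (board : List (List String)), Dom_possible_positions board → Pre_possible_positions board → Spec_possible_positions board (possible_positions board)

-- ===== LEMMAS AND PROOFS =====

-- canonical forms both ports are reduced to (proof-only helpers)
def pvWinA (board : List (List String)) : Bool :=
  (List.range 3).any (fun r =>
      pvCellA board r 0 != " " && pvCellA board r 0 == pvCellA board r 1
        && pvCellA board r 0 == pvCellA board r 2) ||
  ((List.range 3).any (fun c =>
      pvCellA board 0 c != " " && pvCellA board 0 c == pvCellA board 1 c
        && pvCellA board 0 c == pvCellA board 2 c) ||
   ((pvCellA board 0 0 != " " && pvCellA board 0 0 == pvCellA board 1 1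
        && pvCellA board 0 0 == pvCellA board 2 2) ||
    (pvCellA board 0 2 != " " && pvCellA board 0 2 == pvCellA board 1 1
        && pvCellA board 0 2 == pvCellA board 2 0)))

def pvEmpty (board : List (List String)) : List Int :=
  ((List.range 9).filter (fun i => pvCellA board (i / 3) (i % 3) == " ")).map
    (fun (i : Nat) => ((i : Int)))

-- A's 'if cell==" ": possible.append(...)' loop, as filter+map
theorem pv_foldl_append_if {α β : Type} (l : List α) (p : α → Bool) (f : α → β) (acc : List β) :
    l.foldl (fun a x => if p x then a ++ [f x] else a) acc = acc ++ (l.filter p).map f := by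
  induction l generalizing acc with
  | nil => simp
  | cons a l ih => by_cases h : p a <;> simp [h, ih]

-- A's outer row loop, extending the accumulator, as flatMap
theorem pv_foldl_append_flat {α β : Type} (l : List α) (g : α → List β) (acc : List β) :
    l.foldl (fun a x => a ++ g x) acc = acc ++ l.flatMap g := by
  induction l generalizing acc with
  | nil => simp
  | cons a l ih => simp [ih]

-- B's 'if cell==" ": some i' comprehension, as filter+map
theorem pv_filterMap_if {α β : Type} (l : List α) (p : α → Bool) (f : α → β) :
    l.filterMap (fun x => if p x then some (f x) else none) = (l.filter p).map f := by
  induction l with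
  | nil => rfl
  | cons a l ih => by_cases h : p a <;> simp [h, ih]

theorem pv_flatMap_congr {α β : Type} (l : List α) (g h : α → List β)
    (H : ∀ x ∈ l, g x = h x) : l.flatMap g = l.flatMap h := by
  induction l with
  | nil => rfl
  | cons a l ih =>
    simp only [List.flatMap_cons]
    rw [H a (by simp), ih (fun x hx => H x (by simp [hx]))]

theorem pv_any_congr {α : Type} (l : List α) (p q : α → Bool)
    (H : ∀ x ∈ l, p x = q x) : l.any p = l.any q := by
  induction l with
  | nil => rfl
  | cons a l ih =>
    simp only [List.any_cons]
    rw [H a (by simp), ih (fun x hx => H x (by simp [hx]))]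

-- row-major double loop over the 3×3 grid = single loop over the 9 flat indices
theorem pv_grid (f : Nat → Nat → Bool) :
    (List.range 3).flatMap (fun row =>
        ((List.range 3).filter (fun c => f row c)).map (fun (c : Nat) => ((row : Int)) * 3 + ((c : Int))))
      = ((List.range 9).filter (fun i => f (i / 3) (i % 3))).map (fun (i : Nat) => ((i : Int))) := by
  conv_rhs => rw [show List.range 9 = (List.range 3).flatMap (fun r => (List.range 3).map (fun c => r * 3 + c)) from by decide]
  simp only [List.filter_flatMap, List.map_flatMap]
  apply pv_flatMap_congr
  intro row hrow
  rw [List.filter_map, List.map_map]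
  have hr : row < 3 := List.mem_range.mp hrow
  have hfil : List.filter ((fun i => f (i / 3) (i % 3)) ∘ fun c => row * 3 + c) (List.range 3)
      = List.filter (fun c => f row c) (List.range 3) := by
    apply List.filter_congr
    intro c hc
    have hc3 : c < 3 := List.mem_range.mp hc
    simp only [Function.comp_apply]
    congr 1 <;> omega
  rw [hfil]
  apply List.map_congr_left
  intro c hc
  simp only [Function.comp_apply]
  push_cast
  ring

-- flat-list access = direct cell access, for indices below 9
theorem pv_flat_get (board : List (List String)) (i : Nat) (h : i < 9) :
    (pvFlat board).getD i "" = pvCellA board (i / 3) (i % 3) := by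
  interval_cases i <;> rfl

-- the magic-square triple test detects exactly the eight winning lines
-- one line: B's chained equalities from the least cell vs A's two equalities from the first cell
theorem pv_line (a b c : String) : (¬a = " " ∧ a = b ∧ b = c) ↔ ((¬a = " " ∧ a = b) ∧ a = c) := by
  constructor
  · rintro ⟨h1, h2, h3⟩; exact ⟨⟨h1, h2⟩, h2.trans h3⟩
  · rintro ⟨⟨h1, h2⟩, h3⟩; exact ⟨h1, h2, h2.symm.trans h3⟩

theorem pv_guard (g : Nat → Nat → String) :
    ((List.range 9).any (fun i =>
      g (i / 3) (i % 3) != " " &&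
      (List.range' (i + 1) (8 - i)).any (fun j =>
        (List.range' (j + 1) (8 - j)).any (fun k =>
          g (i / 3) (i % 3) == g (j / 3) (j % 3) && g (j / 3) (j % 3) == g (k / 3) (k % 3) &&
            pvMagic.getD i 0 + pvMagic.getD j 0 + pvMagic.getD k 0 == 15))))
    = ((List.range 3).any (fun r =>
        g r 0 != " " && g r 0 == g r 1 && g r 0 == g r 2) ||
       ((List.range 3).any (fun c =>
        g 0 c != " " && g 0 c == g 1 c && g 0 c == g 2 c) ||
        ((g 0 0 != " " && g 0 0 == g 1 1 && g 0 0 == g 2 2) ||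
         (g 0 2 != " " && g 0 2 == g 1 1 && g 0 2 == g 2 0)))) := by
  rw [Bool.eq_iff_iff]
  simp [List.range_succ, List.range', pvMagic]
  simp only [and_or_left, pv_line]
  constructor
  · rintro ((h|h|h)|(h|((h|h)|(h|h))))
    · exact Or.inl (Or.inl h)
    · exact Or.inr (Or.inl (Or.inl h))
    · exact Or.inr (Or.inr (Or.inl h))
    · exact Or.inr (Or.inl (Or.inr (Or.inl h)))
    · exact Or.inr (Or.inr (Or.inr h))
    · exact Or.inr (Or.inl (Or.inr (Or.inr h)))
    · exact Or.inl (Or.inr (Or.inl h))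
    · exact Or.inl (Or.inr (Or.inr h))
  · rintro ((h|h|h)|((h|h|h)|(h|h)))
    · exact Or.inl (Or.inl h)
    · exact Or.inr (Or.inr (Or.inr (Or.inl h)))
    · exact Or.inr (Or.inr (Or.inr (Or.inr h)))
    · exact Or.inl (Or.inr (Or.inl h))
    · exact Or.inr (Or.inl h)
    · exact Or.inr (Or.inr (Or.inl (Or.inr h)))
    · exact Or.inl (Or.inr (Or.inr h))
    · exact Or.inr (Or.inr (Or.inl (Or.inl h)))

-- A's four early returns folded into one guard
theorem pv_ifchain (w1 w2 w3 w4 : Bool) (e1 e2 : List Int) (h : e1 = e2) :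
    (if w1 then [] else if w2 then [] else if w3 then [] else if w4 then [] else e1)
      = if (w1 || (w2 || (w3 || w4))) then [] else e2 := by
  subst h
  cases w1 <;> cases w2 <;> cases w3 <;> cases w4 <;> simp

-- A reduced to canonical form
theorem pv_A_canon (board : List (List String)) :
    possible_positions board = if pvWinA board then [] else pvEmpty board := by
  unfold possible_positions pvWinA pvEmpty
  apply pv_ifchain
  simp only [pv_foldl_append_if, pv_foldl_append_flat, List.nil_append]
  exact pv_grid (fun row c => pvCellA board row c == " ")

-- B reduced to the same canonical form
theorem pv_B_canon (board : List (List String)) :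
    possible_positions_alt board = if pvWinA board then [] else pvEmpty board := by
  simp only [possible_positions_alt]
  unfold pvWinA pvEmpty
  have hB : ((List.range 9).any (fun i =>
      (pvFlat board).getD i "" != " " &&
      (List.range' (i + 1) (8 - i)).any (fun j =>
        (List.range' (j + 1) (8 - j)).any (fun k =>
          (pvFlat board).getD i "" == (pvFlat board).getD j "" &&
          (pvFlat board).getD j "" == (pvFlat board).getD k "" &&
            pvMagic.getD i 0 + pvMagic.getD j 0 + pvMagic.getD k 0 == 15))))
      = ((List.range 9).any (fun i =>
      pvCellA board (i / 3) (i % 3) != " " &&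
      (List.range' (i + 1) (8 - i)).any (fun j =>
        (List.range' (j + 1) (8 - j)).any (fun k =>
          pvCellA board (i / 3) (i % 3) == pvCellA board (j / 3) (j % 3) &&
          pvCellA board (j / 3) (j % 3) == pvCellA board (k / 3) (k % 3) &&
            pvMagic.getD i 0 + pvMagic.getD j 0 + pvMagic.getD k 0 == 15)))) := by
    apply pv_any_congr
    intro i hi
    have hi9 : i < 9 := List.mem_range.mp hi
    rw [pv_flat_get board i hi9]
    congr 1
    apply pv_any_congr
    intro j hj
    have hj9 : j < 9 := by
      have := List.mem_range'_1.mp hj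
      omega
    rw [pv_flat_get board j hj9]
    apply pv_any_congr
    intro k hk
    have hk9 : k < 9 := by
      have := List.mem_range'_1.mp hk
      omega
    rw [pv_flat_get board k hk9]
  rw [hB, pv_guard (pvCellA board)]
  congr 1
  rw [pv_filterMap_if]
  have hfil : List.filter (fun i => (pvFlat board).getD i "" == " ") (List.range 9)
      = List.filter (fun i => pvCellA board (i / 3) (i % 3) == " ") (List.range 9) := by
    apply List.filter_congr
    intro i hi
    rw [pv_flat_get board i (List.mem_range.mp hi)]
  rw [hfil]

-- ===== VERDICT (by name: the statement is the Claim_ definition above) =====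
theorem possible_positions_spec : Claim_equal_possible_positions := by
  intro board _ _
  unfold Spec_possible_positions
  rw [pv_A_canon, pv_B_canon]
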